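-- pv_equiv track=rewrite | github.com/saransh-g1/track_A | reasoning_layer.py | _extract_contradiction_signals
-- ===== SOURCE A (Python) =====
-- from typing import List, Dict, Tuple, Optional
--
-- def _extract_contradiction_signals(reasoning: str) -> List[str]:
--     """Extract contradiction signals from LLM reasoning"""
--     signals = []
--
--     # Look for contradiction keywords
--     contradiction_keywords = [
--         "contradict", "violate", "inconsistent", "conflict",
--         "opposite", "against", "breaks", "disobeys"
--     ]
--
--     reasoning_lower = reasoning.lower()
--     for keyword in contradiction_keywords:
--         if keyword in reasoning_lower:
--             # Extract sentence containing keyword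
--             sentences = reasoning.split('.')
--             for sentence in sentences:
--                 if keyword in sentence.lower():
--                     signals.append(sentence.strip())
--                     break
--
--     return signals
-- ===== SOURCE B (Python) =====
-- from typing import List
--
-- def _extract_contradiction_signals(reasoning: str) -> List[str]:
--     """Extract contradiction signals from LLM reasoning (single pass over sentences)."""
--     contradiction_keywords = [
--         "contradict", "violate", "inconsistent", "conflict",
--         "opposite", "against", "breaks", "disobeys"
--     ]
--
--     first_hit = {}
--     for sentence in reasoning.split('.'):
--         sentence_lower = sentence.lower()
--         for keyword in contradiction_keywords:
--             if keyword not in first_hit and keyword in sentence_lower: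
--                 first_hit[keyword] = sentence.strip()
--
--     return [first_hit[kw] for kw in contradiction_keywords if kw in first_hit]
-- ===== Notes on version B (the rewrite author's own statement) =====
-- stated objective: alternative
-- what changed: A loops over keywords, substring-testing the whole lowered text and re-splitting and re-scanning the sentence list for each keyword; B splits once and makes a single pass over the sentences, filling a keyword-to-first-matching-sentence dict, then emits the recorded sentences in keyword order.
import Mathlib
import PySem

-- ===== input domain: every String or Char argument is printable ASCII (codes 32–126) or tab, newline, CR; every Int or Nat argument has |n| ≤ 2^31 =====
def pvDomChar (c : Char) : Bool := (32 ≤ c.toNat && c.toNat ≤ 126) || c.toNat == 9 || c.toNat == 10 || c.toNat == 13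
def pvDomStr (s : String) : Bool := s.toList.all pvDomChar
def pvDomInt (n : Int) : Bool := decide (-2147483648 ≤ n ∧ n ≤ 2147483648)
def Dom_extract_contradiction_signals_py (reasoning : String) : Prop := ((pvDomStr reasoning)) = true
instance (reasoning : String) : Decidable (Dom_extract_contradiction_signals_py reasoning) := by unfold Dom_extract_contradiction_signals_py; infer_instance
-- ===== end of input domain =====

-- B replaces A's keyword-outer double scan (substring test on the whole text, then a fresh
-- split and sentence scan per keyword) by ONE pass over the sentences that fills a
-- keyword→first-matching-sentence dict, emitted afterwards in keyword order (alternative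
-- decomposition, same result).

-- ===== PORT A =====
def pvContradictionKeywords : List String :=
  ["contradict", "violate", "inconsistent", "conflict",
   "opposite", "against", "breaks", "disobeys"]

-- inner loop of A: 'for sentence in sentences: if keyword in sentence.lower(): signals.append(sentence.strip()); break'
def pvFirstSentenceA (keyword : String) : List String → List String
  | [] => []
  | s :: rest =>
    if PySem.Str.isIn keyword (PySem.Str.lower s) then [PySem.Str.strip s]
    else pvFirstSentenceA keyword rest

def extract_contradiction_signals_py (reasoning : String) : List String :=
  let reasoning_lower := PySem.Str.lower reasoning
  pvContradictionKeywords.foldl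
    (fun signals keyword =>
      if PySem.Str.isIn keyword reasoning_lower then
        -- sentences = reasoning.split('.')  (sep "." is nonempty, so split? is always some)
        signals ++ pvFirstSentenceA keyword ((PySem.Str.split? reasoning ".").getD [])
      else signals) []

-- ===== PORT B =====
-- one sentence of B's pass: record each still-unseen keyword that occurs in this sentence
def pvScanSentence (d : PySem.Dict String String) (s : String) : PySem.Dict String String :=
  let sentence_lower := PySem.Str.lower s
  pvContradictionKeywords.foldl
    (fun d keyword =>
      if !d.contains keyword && PySem.Str.isIn keyword sentence_lower then
        d.insert keyword (PySem.Str.strip s)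
      else d) d

def extract_contradiction_signals_py_alt (reasoning : String) : List String :=
  let first_hit := ((PySem.Str.split? reasoning ".").getD []).foldl pvScanSentence PySem.Dict.empty
  -- [first_hit[kw] for kw in contradiction_keywords if kw in first_hit]
  pvContradictionKeywords.filterMap (fun kw => first_hit.get? kw)

-- ===== PRECONDITION & SPEC =====
def Spec_extract_contradiction_signals_py (reasoning : String) (out : List String) : Prop := out = extract_contradiction_signals_py_alt reasoning
instance (reasoning : String) (out : List String) : Decidable (Spec_extract_contradiction_signals_py reasoning out) := by unfold Spec_extract_contradiction_signals_py; infer_instance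

-- ===== CLAIM (what is proved, stated in full; the proofs are below) =====
def Claim_equal_extract_contradiction_signals_py : Prop := ∀ (reasoning : String), Dom_extract_contradiction_signals_py reasoning → Spec_extract_contradiction_signals_py reasoning (extract_contradiction_signals_py reasoning)

-- ===== LEMMAS AND PROOFS =====

-- the sentences of reasoning.split('.'), as Strings
def pvSentences (reasoning : String) : List String :=
  (PySem.Str.split? reasoning ".").getD []

-- common model: the first sentence containing kw (lower-cased), stripped
def pvModel (reasoning : String) (kw : String) : Option String :=
  ((pvSentences reasoning).find?
      (fun s => PySem.Str.isIn kw (PySem.Str.lower s))).map PySem.Str.strip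

-- every piece produced by splitOn.go is an old accumulator entry or an infix of cur.reverse ++ l
lemma pv_go_infix : ∀ (fuel : Nat) (sep l cur : List Char) (acc : List (List Char)) (p : List Char),
    p ∈ PySem.Chars.splitOn.go sep fuel l cur acc → p ∈ acc ∨ p <:+: cur.reverse ++ l := by
  intro fuel
  induction fuel with
  | zero =>
    intro sep l cur acc p h
    rw [PySem.Chars.splitOn.go.eq_def] at h
    simp at h
    rcases h with h | h
    · exact Or.inl h
    · exact Or.inr (h ▸ List.infix_refl _)
  | succ fuel ih =>
    intro sep l cur acc p h
    cases l with
    | nil =>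
      rw [PySem.Chars.splitOn.go.eq_def] at h
      simp at h
      rcases h with h | h
      · exact Or.inl h
      · exact Or.inr (h ▸ (List.prefix_append _ _).isInfix)
    | cons c rest =>
      rw [PySem.Chars.splitOn.go.eq_def] at h
      simp only at h
      by_cases hp : sep.isPrefixOf (c :: rest) = true
      · rw [if_pos hp] at h
        rcases ih _ _ _ _ _ h with h2 | h2
        · rcases List.mem_cons.mp h2 with h3 | h3
          · exact Or.inr (h3 ▸ (List.prefix_append _ _).isInfix)
          · exact Or.inl h3
        · refine Or.inr (h2.trans ?_)
          simp only [List.reverse_nil, List.nil_append]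
          exact ((List.drop_suffix _ _).trans (List.suffix_append _ _)).isInfix
      · rw [if_neg hp] at h
        rcases ih _ _ _ _ _ h with h2 | h2
        · exact Or.inl h2
        · refine Or.inr ?_
          simpa [List.append_assoc] using h2

lemma pv_mem_splitOn_infix {s sep p : List Char} (h : p ∈ PySem.Chars.splitOn s sep) : p <:+: s := by
  unfold PySem.Chars.splitOn at h
  rcases pv_go_infix _ _ _ _ _ _ h with h | h
  · simp at h
  · simpa using h

-- a keyword found in a sentence of reasoning is found in the whole lowered reasoning
lemma pv_sentence_in_reasoning {reasoning kw sent : String}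
    (hs : sent ∈ pvSentences reasoning)
    (h : PySem.Str.isIn kw (PySem.Str.lower sent) = true) :
    PySem.Str.isIn kw (PySem.Str.lower reasoning) = true := by
  rw [PySem.Str.isIn_iff_infix] at h ⊢
  rw [PySem.Str.toList_lower] at h ⊢
  unfold pvSentences at hs
  simp [PySem.Str.split?, PySem.Chars.split?] at hs
  obtain ⟨cs, hcs, rfl⟩ := hs
  have hinf : cs <:+: reasoning.toList := pv_mem_splitOn_infix hcs
  have hlow : PySem.Chars.lower cs <:+: PySem.Chars.lower reasoning.toList := by
    simpa [PySem.Chars.lower] using hinf.map PySem.Chars.lowerChar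
  have hofl : (String.ofList cs).toList = cs := by simp
  rw [hofl] at h
  exact h.trans hlow

-- A's inner loop returns the first matching sentence, stripped
lemma pv_firstSentenceA_eq (kw : String) (ss : List String) :
    pvFirstSentenceA kw ss
      = ((ss.find? (fun s => PySem.Str.isIn kw (PySem.Str.lower s))).map PySem.Str.strip).toList := by
  induction ss with
  | nil => rfl
  | cons s rest ih =>
    cases h : PySem.Str.isIn kw (PySem.Str.lower s) with
    | true => simp only [pvFirstSentenceA, List.find?_cons, h, if_true]; rfl
    | false => simp only [pvFirstSentenceA, List.find?_cons, h]; exact ih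

-- A's outer loop equals filterMap over the model
lemma pv_foldA (reasoning : String) : ∀ (kws : List String) (acc : List String),
    kws.foldl
      (fun signals keyword =>
        if PySem.Str.isIn keyword (PySem.Str.lower reasoning) then
          signals ++ pvFirstSentenceA keyword ((PySem.Str.split? reasoning ".").getD [])
        else signals) acc
    = acc ++ kws.filterMap (fun kw => pvModel reasoning kw) := by
  intro kws
  induction kws with
  | nil => simp
  | cons kw kws ih =>
    intro acc
    by_cases h : PySem.Str.isIn kw (PySem.Str.lower reasoning) = true
    · rw [List.foldl_cons, if_pos h, ih, pv_firstSentenceA_eq, List.filterMap_cons]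
      rw [show ((PySem.Str.split? reasoning ".").getD []) = pvSentences reasoning from rfl]
      rw [show (((pvSentences reasoning).find?
            (fun s => PySem.Str.isIn kw (PySem.Str.lower s))).map PySem.Str.strip)
          = pvModel reasoning kw from rfl]
      cases hm : pvModel reasoning kw with
      | none => simp
      | some v => simp
    · rw [List.foldl_cons, if_neg h, ih, List.filterMap_cons]
      have hm : pvModel reasoning kw = none := by
        unfold pvModel
        rw [Option.map_eq_none_iff, List.find?_eq_none]
        intro s hs hcon
        exact h (pv_sentence_in_reasoning hs hcon)
      rw [hm]

-- B's per-sentence keyword loop: lookup after one sentence's scan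
lemma pv_scan_get? (s : String) : ∀ (kws : List String) (d : PySem.Dict String String) (kw : String),
    (kws.foldl
        (fun d keyword =>
          if !d.contains keyword && PySem.Str.isIn keyword (PySem.Str.lower s) then
            d.insert keyword (PySem.Str.strip s)
          else d) d).get? kw
      = if kw ∈ kws ∧ d.contains kw = false ∧ PySem.Str.isIn kw (PySem.Str.lower s) = true
          then some (PySem.Str.strip s) else d.get? kw := by
  intro kws
  induction kws with
  | nil => intro d kw; rw [List.foldl_nil, if_neg (fun hh => (List.not_mem_nil).elim hh.1)]
  | cons k kws ih =>
    intro d kw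
    rw [List.foldl_cons]
    by_cases hk : k = kw
    · subst hk
      rcases Bool.eq_false_or_eq_true (d.contains k) with hck | hck
      · rw [if_neg (by rw [hck]; simp), ih,
            if_neg (fun hh => Bool.noConfusion (hck.symm.trans hh.2.1)),
            if_neg (fun hh => Bool.noConfusion (hck.symm.trans hh.2.1))]
      · rcases Bool.eq_false_or_eq_true (PySem.Str.isIn k (PySem.Str.lower s)) with hin | hin
        · rw [if_pos (by rw [hck, hin]; rfl), ih]
          have hcont : (d.insert k (PySem.Str.strip s)).contains k = true := by
            rw [PySem.Dict.contains_insert]; simp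
          rw [if_neg (fun hh => Bool.noConfusion (hcont.symm.trans hh.2.1)),
              PySem.Dict.get?_insert_self,
              if_pos ⟨List.mem_cons_self, hck, hin⟩]
        · rw [if_neg (by rw [hin]; simp), ih,
              if_neg (fun hh => Bool.noConfusion (hin.symm.trans hh.2.2)),
              if_neg (fun hh => Bool.noConfusion (hin.symm.trans hh.2.2))]
    · have hmemiff : kw ∈ k :: kws ↔ kw ∈ kws := by
        constructor
        · intro hh
          rcases List.mem_cons.mp hh with e | hh2
          · exact absurd e.symm hk
          · exact hh2
        · exact List.mem_cons_of_mem _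
      by_cases hb : (!d.contains k && PySem.Str.isIn k (PySem.Str.lower s)) = true
      · rw [if_pos hb, ih,
            PySem.Dict.get?_insert_of_ne _ _ (fun e => hk e.symm)]
        have hcont : (d.insert k (PySem.Str.strip s)).contains kw = d.contains kw := by
          rw [PySem.Dict.contains_insert]
          simp [show (kw == k) = false from beq_eq_false_iff_ne.mpr (fun e => hk e.symm)]
        rw [hcont]
        simp only [hmemiff]
      · rw [if_neg hb, ih]
        simp only [hmemiff]

-- B's fold over the sentences: final lookup = earlier value or first matching sentence
lemma pv_fold_scan_get? (kw : String) (hkw : kw ∈ pvContradictionKeywords) :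
    ∀ (ss : List String) (d : PySem.Dict String String),
    (ss.foldl pvScanSentence d).get? kw
      = (d.get? kw).or
          (((ss.find? (fun s => PySem.Str.isIn kw (PySem.Str.lower s))).map PySem.Str.strip)) := by
  intro ss
  induction ss with
  | nil => intro d; simp
  | cons s ss ih =>
    intro d
    rw [List.foldl_cons, ih]
    have hstep : (pvScanSentence d s).get? kw
        = if kw ∈ pvContradictionKeywords ∧ d.contains kw = false ∧ PySem.Str.isIn kw (PySem.Str.lower s) = true
            then some (PySem.Str.strip s) else d.get? kw := pv_scan_get? s pvContradictionKeywords d kw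
    rcases Bool.eq_false_or_eq_true (d.contains kw) with hc | hc
    · obtain ⟨v, hv⟩ : ∃ v, d.get? kw = some v := by
        have hh := PySem.Dict.contains_eq_isSome_get? d kw
        rw [hc] at hh
        exact Option.isSome_iff_exists.mp hh.symm
      rw [hstep, if_neg (fun hh => Bool.noConfusion (hc.symm.trans hh.2.1)), hv]
      simp
    · have hnone : d.get? kw = none := by
        have hh := PySem.Dict.contains_eq_isSome_get? d kw
        rw [hc] at hh
        simpa using hh.symm
      rcases Bool.eq_false_or_eq_true (PySem.Str.isIn kw (PySem.Str.lower s)) with hin | hin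
      · rw [hstep, if_pos ⟨hkw, hc, hin⟩, hnone]
        rw [List.find?_cons_of_pos (p := fun s => PySem.Str.isIn kw (PySem.Str.lower s)) hin]
        simp
      · rw [hstep, if_neg (fun hh => Bool.noConfusion (hin.symm.trans hh.2.2)), hnone]
        rw [List.find?_cons_of_neg (p := fun s => PySem.Str.isIn kw (PySem.Str.lower s))
              (fun e => Bool.noConfusion (hin.symm.trans e))]

-- B equals filterMap over the model
lemma pv_B_eq_model (reasoning : String) :
    extract_contradiction_signals_py_alt reasoning
      = pvContradictionKeywords.filterMap (fun kw => pvModel reasoning kw) := by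
  unfold extract_contradiction_signals_py_alt
  refine List.filterMap_congr (fun kw hkw => ?_)
  rw [show (PySem.Str.split? reasoning ".").getD [] = pvSentences reasoning from rfl,
      pv_fold_scan_get? kw hkw]
  simp [pvModel]

-- ===== VERDICT (by name: the statement is the Claim_ definition above) =====
theorem extract_contradiction_signals_py_spec : Claim_equal_extract_contradiction_signals_py := by
  intro reasoning _
  unfold Spec_extract_contradiction_signals_py
  rw [pv_B_eq_model]
  unfold extract_contradiction_signals_py
  simpa using pv_foldA reasoning pvContradictionKeywords []
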